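-- pv_equiv track=rewrite | github.com/playtym/legaltech-notice-agent | final_convert.py | fix_q_marks
-- ===== SOURCE A (Python) =====
-- def fix_q_marks(q):
--     parts = q.split("?")
--     if len(parts) == 1:
--         return q
--     out = parts[0]
--     for i in range(1, len(parts)):
--         out += f"${i}" + parts[i]
--     return out
-- ===== SOURCE B (Python) =====
-- def fix_q_marks(q):
--     out = []
--     n = 0
--     for ch in q:
--         if ch == "?":
--             n += 1
--             out.append(f"${n}")
--         else:
--             out.append(ch)
--     return "".join(out)
-- ===== Notes on version B (the rewrite author's own statement) =====
-- stated objective: idiomatic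
-- what changed: Replaced the split-on-question-mark-and-reassemble strategy with a single left-to-right character scan that keeps a running counter and appends either the character or the next numbered dollar placeholder.
import Mathlib
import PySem

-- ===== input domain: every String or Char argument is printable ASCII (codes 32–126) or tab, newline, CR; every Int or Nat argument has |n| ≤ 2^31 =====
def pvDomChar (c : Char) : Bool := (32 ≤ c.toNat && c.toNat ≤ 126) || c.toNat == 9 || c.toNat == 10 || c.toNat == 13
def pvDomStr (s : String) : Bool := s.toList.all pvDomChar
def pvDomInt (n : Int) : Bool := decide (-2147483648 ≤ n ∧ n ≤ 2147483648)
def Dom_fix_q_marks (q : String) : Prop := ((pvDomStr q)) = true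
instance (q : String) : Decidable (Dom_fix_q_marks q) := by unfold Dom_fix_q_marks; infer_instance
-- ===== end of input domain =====

-- B replaces A's split-and-reassemble strategy with a single left-to-right character scan keeping a
-- running counter (idiomatic; same asymptotic cost).

-- ===== PORT A =====
-- parts[0] / parts[i]: splitOn always returns at least one piece and i < len(parts),
-- so the .getD [] defaults are never taken.
def fix_q_marks (q : String) : String :=
  let parts := PySem.Chars.splitOn q.toList ['?']
  if parts.length == 1 then q
  else
    let out := (PySem.List.pyGet? parts 0).getD []
    String.ofList ((PySem.List.pyRange 1 (parts.length : Int) 1).foldl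
      (fun out i => out ++ ('$' :: (PySem.Int.toStr i).toList) ++ (PySem.List.pyGet? parts i).getD [])
      out)

-- ===== PORT B =====
def fix_q_marks_alt (q : String) : String :=
  let r := q.toList.foldl
    (fun (st : Int × List (List Char)) ch =>
      if ch = '?' then (st.1 + 1, st.2 ++ [('$' :: (PySem.Int.toStr (st.1 + 1)).toList)])
      else (st.1, st.2 ++ [[ch]]))
    ((0 : Int), ([] : List (List Char)))
  String.ofList (PySem.Chars.join [] r.2)

-- ===== PRECONDITION & SPEC =====
def Spec_fix_q_marks (q : String) (out : String) : Prop := out = fix_q_marks_alt q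
instance (q : String) (out : String) : Decidable (Spec_fix_q_marks q out) := by unfold Spec_fix_q_marks; infer_instance

-- ===== CLAIM (what is proved, stated in full; the proofs are below) =====
def Claim_equal_fix_q_marks : Prop := ∀ (q : String), Dom_fix_q_marks q → Spec_fix_q_marks q (fix_q_marks q)

-- ===== LEMMAS AND PROOFS =====

-- Simple structural split on '?', used to characterise both ports.
def qsplit : List Char → List (List Char)
  | [] => [[]]
  | c :: cs =>
    if c = '?' then [] :: qsplit cs
    else
      match qsplit cs with
      | [] => [[c]]
      | p :: ps => (c :: p) :: ps

def consHead (p : List Char) : List (List Char) → List (List Char)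
  | [] => [p]
  | x :: xs => (p ++ x) :: xs

-- "$k" ++ piece, for consecutive k starting at n
def tailRender : Int → List (List Char) → List Char
  | _, [] => []
  | n, p :: ps => ('$' :: (PySem.Int.toStr n).toList) ++ p ++ tailRender (n + 1) ps

-- the pieces B's scan appends, with counter starting at n
def piecesB : Int → List Char → List (List Char)
  | _, [] => []
  | n, c :: cs =>
    if c = '?' then ('$' :: (PySem.Int.toStr (n + 1)).toList) :: piecesB (n + 1) cs
    else [c] :: piecesB n cs

lemma qsplit_ne_nil (l : List Char) : qsplit l ≠ [] := by
  cases l with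
  | nil => simp [qsplit]
  | cons c cs =>
    simp only [qsplit]
    split
    · simp
    · cases h : qsplit cs <;> simp

lemma go_spec (fuel : Nat) : ∀ (l cur : List Char) (acc : List (List Char)),
    l.length ≤ fuel →
    PySem.Chars.splitOn.go ['?'] fuel l cur acc = acc.reverse ++ consHead cur.reverse (qsplit l) := by
  induction fuel with
  | zero =>
    intro l cur acc h
    have : l = [] := by cases l <;> simp_all
    subst this
    simp [PySem.Chars.splitOn.go, qsplit, consHead]
  | succ fuel ih =>
    intro l cur acc h
    cases l with
    | nil => simp [PySem.Chars.splitOn.go, qsplit, consHead]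
    | cons c rest =>
      by_cases hc : c = '?'
      · subst hc
        have : PySem.Chars.splitOn.go ['?'] (fuel + 1) ('?' :: rest) cur acc
            = PySem.Chars.splitOn.go ['?'] fuel rest [] (cur.reverse :: acc) := by
          simp [PySem.Chars.splitOn.go, List.isPrefixOf]
        rw [this, ih rest [] (cur.reverse :: acc) (by simpa using h)]
        have hne := qsplit_ne_nil rest
        cases hq : qsplit rest with
        | nil => exact absurd hq hne
        | cons p ps => simp [qsplit, consHead, hq]
      · have : PySem.Chars.splitOn.go ['?'] (fuel + 1) (c :: rest) cur acc
            = PySem.Chars.splitOn.go ['?'] fuel rest (c :: cur) acc := by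
          simp [PySem.Chars.splitOn.go, List.isPrefixOf, Ne.symm hc]
        rw [this, ih rest (c :: cur) acc (by simpa using h)]
        have hne := qsplit_ne_nil rest
        cases hq : qsplit rest with
        | nil => exact absurd hq hne
        | cons p ps => simp [qsplit, consHead, hq, hc]

lemma splitOn_eq (l : List Char) : PySem.Chars.splitOn l ['?'] = qsplit l := by
  have h := go_spec (l.length + 1) l [] [] (by omega)
  have hne := qsplit_ne_nil l
  cases hq : qsplit l with
  | nil => exact absurd hq hne
  | cons p ps =>
    simpa [PySem.Chars.splitOn, consHead, hq] using h

lemma qsplit_singleton (l : List Char) (p : List Char) (h : qsplit l = [p]) : p = l := by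
  induction l generalizing p with
  | nil => simp [qsplit] at h; exact h
  | cons c cs ih =>
    by_cases hc : c = '?'
    · subst hc; simp [qsplit] at h
      exact absurd h.2 (qsplit_ne_nil cs)
    · simp only [qsplit, if_neg hc] at h
      cases hq : qsplit cs with
      | nil => exact absurd hq (qsplit_ne_nil cs)
      | cons p' ps =>
        rw [hq] at h
        have h1 : c :: p' = p ∧ ps = [] := by
          constructor <;> simp_all
        obtain ⟨h1, h2⟩ := h1
        subst h2
        have := ih p' hq
        subst this
        exact h1.symm

lemma join_nil_flatten (xs : List (List Char)) : PySem.Chars.join [] xs = xs.flatten := by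
  induction xs with
  | nil => simp [PySem.Chars.join, List.intercalate]
  | cons a t ih =>
    cases t with
    | nil => simp [PySem.Chars.join, List.intercalate]
    | cons b t' =>
      rw [PySem.Chars.join_cons_cons]
      simp only [List.flatten_cons]
      rw [← List.flatten_cons]
      simp [ih]

lemma scan_eq (l : List Char) : ∀ (n : Int) (out : List (List Char)),
    l.foldl
      (fun (st : Int × List (List Char)) ch =>
        if ch = '?' then (st.1 + 1, st.2 ++ [('$' :: (PySem.Int.toStr (st.1 + 1)).toList)])
        else (st.1, st.2 ++ [[ch]]))
      (n, out)
    = (n + (l.count '?' : Int), out ++ piecesB n l) := by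
  induction l with
  | nil => intro n out; simp [piecesB]
  | cons c cs ih =>
    intro n out
    by_cases hc : c = '?'
    · subst hc
      simp only [List.foldl_cons, if_true]
      rw [ih]
      simp only [piecesB, List.count_cons, Prod.mk.injEq]
      refine ⟨by simp only [if_true, beq_self_eq_true]; omega, by simp⟩
    · simp only [List.foldl_cons, if_neg hc]
      rw [ih]
      simp [piecesB, hc]

lemma flatten_piecesB (l : List Char) : ∀ (n : Int),
    (piecesB n l).flatten = (qsplit l).headI ++ tailRender (n + 1) (qsplit l).tail := by
  induction l with
  | nil => intro n; simp [piecesB, qsplit, tailRender]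
  | cons c cs ih =>
    intro n
    by_cases hc : c = '?'
    · subst hc
      cases hq : qsplit cs with
      | nil => exact absurd hq (qsplit_ne_nil cs)
      | cons p ps =>
        simp [piecesB, qsplit, hq, tailRender, ih (n + 1)]
    · cases hq : qsplit cs with
      | nil => exact absurd hq (qsplit_ne_nil cs)
      | cons p ps =>
        simp [piecesB, qsplit, hc, hq, ih n]

lemma pyRange_nil_of_le {a b : Int} (h : b ≤ a) : PySem.List.pyRange a b 1 = [] := by
  simp [PySem.List.pyRange]
  omega

lemma afold_spec (ps : List (List Char)) : ∀ (parts : List (List Char)) (k : Nat) (out : List Char),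
    1 ≤ k → parts.drop k = ps →
    (PySem.List.pyRange (k : Int) (parts.length : Int) 1).foldl
      (fun out i => out ++ ('$' :: (PySem.Int.toStr i).toList) ++ (PySem.List.pyGet? parts i).getD [])
      out
    = out ++ tailRender (k : Int) ps := by
  induction ps with
  | nil =>
    intro parts k out _ hd
    have hlen : parts.length ≤ k := by
      by_contra hlt0
      have hlt : k < parts.length := by omega
      have : parts.drop k ≠ [] := by
        apply List.ne_nil_of_length_pos
        simp [List.length_drop]; omega
      exact this hd
    rw [pyRange_nil_of_le (by exact_mod_cast hlen)]
    simp [tailRender]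
  | cons p ps' ih =>
    intro parts k out hk hd
    have hlt : k < parts.length := by
      by_contra hge
      have hge' : parts.length ≤ k := by omega
      rw [List.drop_eq_nil_of_le hge'] at hd
      simp at hd
    have hget : parts[k]? = some p := by
      have h0 := congrArg (fun l => l[0]?) hd
      simpa using h0
    have hd' : parts.drop (k + 1) = ps' := by
      have : parts.drop (k + 1) = (parts.drop k).drop 1 := by
        rw [List.drop_drop]
      rw [this, hd]
      simp
    rw [PySem.List.pyRange_one_cons (by exact_mod_cast hlt)]
    rw [List.foldl_cons]
    have hcast : ((k : Int) + 1) = ((k + 1 : Nat) : Int) := by push_cast; ring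
    rw [hcast, ih parts (k + 1) _ (by omega) hd']
    simp [tailRender, PySem.List.pyGet?_natCast, hget]

-- ===== VERDICT =====
theorem fix_q_marks_spec : Claim_equal_fix_q_marks := by
  unfold Claim_equal_fix_q_marks
  intro q _
  unfold Spec_fix_q_marks fix_q_marks fix_q_marks_alt
  simp only [splitOn_eq, scan_eq, join_nil_flatten, List.nil_append, flatten_piecesB]
  have hne := qsplit_ne_nil q.toList
  cases hq : qsplit q.toList with
  | nil => exact absurd hq hne
  | cons p ps =>
    by_cases h1 : ps = []
    · subst h1
      have hp := qsplit_singleton _ _ hq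
      subst hp
      simp [tailRender]
    · have hlen : ((p :: ps).length == 1) = false := by
        cases ps with
        | nil => exact absurd rfl h1
        | cons a t => simp
      simp only [hlen, Bool.false_eq_true, if_false]
      have ha := afold_spec ps (p :: ps) 1 ((PySem.List.pyGet? (p :: ps) 0).getD []) (le_refl 1) (by simp)
      rw [Nat.cast_one] at ha
      rw [ha]
      simp [PySem.List.pyGet?, PySem.List.pyIdx?]
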